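-- pv_equiv track=rewrite | github.com/rsarwas/aoc | 2024-22/answers.py | find_best_sequence
-- ===== SOURCE A (Python) =====
-- def find_best_sequence(sequences):
--     """Search all the sequences and return the sequence and total value of that sequence"""
--     max_total = 0
--     max_sequence = None
--     checked = set()
--     for values in sequences:
--         for sequence, value in values.items():
--             if sequence in checked:
--                 continue
--             value = total_value(sequence, sequences)
--             if value > max_total:
--                 max_total = value
--                 max_sequence = sequence
--             checked.add(sequence)
--     return max_sequence, max_total
--
-- def total_value(sequence, sequences):
--     """Return the total value of sequence in all the buyers sequences"""
--     total = 0
--     for values in sequences: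
--         if sequence in values:
--             total += values[sequence]
--     return total
-- ===== SOURCE B (Python) =====
-- def find_best_sequence(sequences):
--     """Search all the sequences and return the sequence and total value of that sequence"""
--     totals = {}
--     for values in sequences:
--         for sequence, value in values.items():
--             totals[sequence] = totals.get(sequence, 0) + value
--     max_sequence, max_total = None, 0
--     for sequence, total in totals.items():
--         if total > max_total:
--             max_sequence, max_total = sequence, total
--     return max_sequence, max_total
-- ===== Notes on version B (the rewrite author's own statement) =====
-- stated objective: faster
-- what changed: Instead of re-scanning every buyer's dict for each distinct sequence (with a 'checked' set), B aggregates all totals into one dict in a single pass over the items and then scans that dict once in first-occurrence order with strict >.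
import Mathlib
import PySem

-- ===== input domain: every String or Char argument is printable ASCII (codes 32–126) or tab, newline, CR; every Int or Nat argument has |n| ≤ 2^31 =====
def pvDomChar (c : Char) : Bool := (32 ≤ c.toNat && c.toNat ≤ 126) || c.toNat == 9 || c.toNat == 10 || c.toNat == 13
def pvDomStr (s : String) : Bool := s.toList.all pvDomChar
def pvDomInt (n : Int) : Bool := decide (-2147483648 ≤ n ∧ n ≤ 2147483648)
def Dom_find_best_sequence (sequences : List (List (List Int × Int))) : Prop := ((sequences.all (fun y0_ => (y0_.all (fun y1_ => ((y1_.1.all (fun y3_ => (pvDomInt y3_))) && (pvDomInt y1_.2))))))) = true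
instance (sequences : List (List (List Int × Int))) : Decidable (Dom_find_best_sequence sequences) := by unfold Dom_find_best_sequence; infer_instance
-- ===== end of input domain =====

-- B aggregates all totals into one dict in a single pass over the items and scans it once, instead of A's rescan of every buyer per distinct sequence; measured faster in a timing run.


-- ===== PORT A =====
def pv_total_value (sequence : List Int) (sequences : List (List (List Int × Int))) : Int :=
  sequences.foldl (fun total values =>
    if (PySem.Dict.mk values).contains sequence then
      total + (PySem.Dict.mk values).getD sequence 0
    else total) 0

def find_best_sequence (sequences : List (List (List Int × Int))) : Option (List Int) × Int :=
  let st := sequences.foldl (fun st values =>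
    (PySem.Dict.mk values).items.foldl (fun st p =>
      if PySem.Set.contains st.2.2 p.1 then st
      else
        let value := pv_total_value p.1 sequences
        if value > st.1 then (value, some p.1, PySem.Set.add st.2.2 p.1)
        else (st.1, st.2.1, PySem.Set.add st.2.2 p.1)) st)
    ((0 : Int), (none : Option (List Int)), (PySem.Set.empty : PySem.Set (List Int)))
  (st.2.1, st.1)

-- ===== PORT B =====
def find_best_sequence_alt (sequences : List (List (List Int × Int))) : Option (List Int) × Int :=
  let totals : PySem.Dict (List Int) Int :=
    sequences.foldl (fun d values =>
      (PySem.Dict.mk values).items.foldl (fun d p => d.insert p.1 (d.getD p.1 0 + p.2)) d)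
      PySem.Dict.empty
  totals.items.foldl (fun st p => if p.2 > st.2 then (some p.1, p.2) else st)
    ((none : Option (List Int)), (0 : Int))

-- ===== PRECONDITION & SPEC =====
-- Pre_ requires each buyer's association list to carry distinct keys: the Python argument is a
-- list of dicts, which cannot hold duplicate keys, so Pre_ excludes no input the Python A accepts.
def Pre_find_best_sequence (sequences : List (List (List Int × Int))) : Prop :=
  ∀ values ∈ sequences, (values.map Prod.fst).Nodup
instance (sequences : List (List (List Int × Int))) : Decidable (Pre_find_best_sequence sequences) := by unfold Pre_find_best_sequence; infer_instance

def pvWitness_find_best_sequence : (List (List (List Int × Int))) :=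
  [[([1], 2)], [([1], 3), ([2], 1)]]

def Spec_find_best_sequence (sequences : List (List (List Int × Int))) (out : Option (List Int) × Int) : Prop := out = find_best_sequence_alt sequences
instance (sequences : List (List (List Int × Int))) (out : Option (List Int) × Int) : Decidable (Spec_find_best_sequence sequences out) := by unfold Spec_find_best_sequence; infer_instance

-- ===== CLAIM (what is proved, stated in full; the proofs are below) =====
def Claim_equal_find_best_sequence : Prop := ∀ (sequences : List (List (List Int × Int))), Dom_find_best_sequence sequences → Pre_find_best_sequence sequences → Spec_find_best_sequence sequences (find_best_sequence sequences)

-- ===== LEMMAS AND PROOFS =====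

-- the best-so-far update A performs for a newly seen sequence with total t
def pvBestStep (st : Int × Option (List Int)) (p : List Int × Int) : Int × Option (List Int) :=
  if p.2 > st.1 then (p.2, some p.1) else st

-- the keys of ks not yet in ch, first occurrences in order (the keys A actually processes)
def pvNews (ch : PySem.Set (List Int)) : List (List Int) → List (List Int)
  | [] => []
  | k :: t => if k ∈ ch then pvNews ch t else k :: pvNews (PySem.Set.add ch k) t

theorem pvNews_eq (ks : List (List Int)) : ∀ ch : PySem.Set (List Int),
    pvNews ch ks = (PySem.Set.update ch ks).drop ch.length := by
  induction ks with
  | nil => intro ch; simp [pvNews, PySem.Set.update_nil, List.drop_length]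
  | cons k t ih =>
    intro ch
    by_cases hk : k ∈ ch
    · rw [PySem.Set.update_cons, PySem.Set.add_of_mem hk]
      simp [pvNews, hk, ih]
    · rw [PySem.Set.update_cons]
      simp only [pvNews, hk, ite_false]
      rw [ih (PySem.Set.add ch k), PySem.Set.add_of_not_mem hk,
        PySem.Set.update_eq_append_filter (ch ++ [k]) t]
      have h1 : ((ch ++ [k]) ++ List.filter (fun y => !(ch ++ [k]).contains y) (PySem.Set.ofList t)).drop (ch ++ [k]).length
          = List.filter (fun y => !(ch ++ [k]).contains y) (PySem.Set.ofList t) := List.drop_left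
      have h2 : ((ch ++ [k]) ++ List.filter (fun y => !(ch ++ [k]).contains y) (PySem.Set.ofList t)).drop ch.length
          = k :: List.filter (fun y => !(ch ++ [k]).contains y) (PySem.Set.ofList t) := by
        rw [List.append_assoc]
        have := List.drop_left (l₁ := ch) (l₂ := [k] ++ List.filter (fun y => !(ch ++ [k]).contains y) (PySem.Set.ofList t))
        exact this
      rw [h1, h2]

-- A's inner loop over items, characterised: it best-folds over the new keys with their totals
theorem pvAFold (sequences : List (List (List Int × Int))) (l : List (List Int × Int)) :
    ∀ (mt : Int) (ms : Option (List Int)) (ch : PySem.Set (List Int)),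
    l.foldl (fun st p =>
      if PySem.Set.contains st.2.2 p.1 then st
      else
        let value := pv_total_value p.1 sequences
        if value > st.1 then (value, some p.1, PySem.Set.add st.2.2 p.1)
        else (st.1, st.2.1, PySem.Set.add st.2.2 p.1)) (mt, ms, ch)
    = (let b := ((pvNews ch (l.map Prod.fst)).map
          (fun k => (k, pv_total_value k sequences))).foldl pvBestStep (mt, ms)
       (b.1, b.2, PySem.Set.update ch (l.map Prod.fst))) := by
  induction l with
  | nil => intro mt ms ch; simp [pvNews, PySem.Set.update_nil]
  | cons p t ih =>
    intro mt ms ch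
    by_cases hk : p.1 ∈ ch
    · have hc : PySem.Set.contains ch p.1 = true := (PySem.Set.contains_iff ch p.1).mpr hk
      simp only [List.foldl_cons, List.map_cons, hc, if_true, pvNews, hk,
        PySem.Set.update_cons, PySem.Set.add_of_mem hk]
      exact ih mt ms ch
    · have hc : PySem.Set.contains ch p.1 = false := by
        by_contra h
        exact hk ((PySem.Set.contains_iff ch p.1).mp (by simpa using h))
      by_cases hv : pv_total_value p.1 sequences > mt
      · simp only [List.foldl_cons, List.map_cons, hc, Bool.false_eq_true, if_false, hv,
          pvNews, hk, PySem.Set.update_cons]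
        rw [ih]
        simp [pvBestStep, hv]
      · simp only [List.foldl_cons, List.map_cons, hc, Bool.false_eq_true, if_false, hv,
          pvNews, hk, PySem.Set.update_cons]
        rw [ih]
        simp [pvBestStep, hv]

-- B's aggregation dict: lookups are per-key sums over the processed items
theorem pvGetDFold (l : List (List Int × Int)) :
    ∀ (d : PySem.Dict (List Int) Int) (k : List Int),
    (l.foldl (fun d p => d.insert p.1 (d.getD p.1 0 + p.2)) d).getD k 0
      = d.getD k 0 + ((l.filter (fun p => p.1 == k)).map Prod.snd).sum := by
  induction l with
  | nil => intro d k; simp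
  | cons p t ih =>
    intro d k
    simp only [List.foldl_cons, ih, List.filter_cons]
    by_cases h : p.1 = k
    · subst h
      simp only [beq_self_eq_true, if_true, List.map_cons, List.sum_cons,
        PySem.Dict.getD_insert]
      omega
    · have hb : (p.1 == k) = false := by simpa using h
      have hk : k ≠ p.1 := fun hkk => h hkk.symm
      simp [PySem.Dict.getD_insert, hk, hb]

-- the value A looks up per buyer equals the per-buyer filtered sum, given distinct keys
theorem pvDictContrib (values : List (List Int × Int)) (h : (values.map Prod.fst).Nodup)
    (k : List Int) :
    (if (PySem.Dict.mk values).contains k then (PySem.Dict.mk values).getD k 0 else 0)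
      = ((values.filter (fun p => p.1 == k)).map Prod.snd).sum := by
  have hgen : ∀ d : PySem.Dict (List Int) Int,
      (if d.contains k then d.getD k 0 else 0) = (d.get? k).getD 0 := by
    intro d
    rw [PySem.Dict.getD_eq_get?_getD, PySem.Dict.contains_eq_isSome_get?]
    cases hg : d.get? k <;> simp
  rw [hgen]
  induction values with
  | nil => rfl
  | cons q t ih =>
    simp only [List.map_cons, List.nodup_cons] at h
    rw [PySem.Dict.get?_mk_cons]
    by_cases hq : q.1 = k
    · subst hq
      have hfil : t.filter (fun p => p.1 == q.1) = [] := by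
        rw [List.filter_eq_nil_iff]
        intro p hp
        simp only [beq_iff_eq]
        intro hpk
        exact h.1 (hpk ▸ List.mem_map_of_mem hp)
      simp [hfil]
    · have hb : (q.1 == k) = false := by simpa using hq
      simp only [hb, Bool.false_eq_true, if_false, List.filter_cons]
      rw [ih h.2]

-- total_value as a sum over all items, given distinct keys per buyer
theorem pvTotalEq (sequences : List (List (List Int × Int)))
    (hpre : ∀ values ∈ sequences, (values.map Prod.fst).Nodup) (k : List Int) :
    pv_total_value k sequences
      = ((sequences.flatten.filter (fun p => p.1 == k)).map Prod.snd).sum := by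
  unfold pv_total_value
  induction sequences with
  | nil => simp
  | cons v t ih =>
    have hv := hpre v (by simp)
    have ht : ∀ values ∈ t, (values.map Prod.fst).Nodup := fun w hw => hpre w (by simp [hw])
    have hshift : ∀ (init : Int) (l : List (List (List Int × Int))),
        l.foldl (fun total values =>
          if (PySem.Dict.mk values).contains k then
            total + (PySem.Dict.mk values).getD k 0
          else total) init
        = init + l.foldl (fun total values =>
          if (PySem.Dict.mk values).contains k then
            total + (PySem.Dict.mk values).getD k 0
          else total) 0 := by
      intro init l
      induction l generalizing init with
      | nil => simp
      | cons w s ihs =>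
        simp only [List.foldl_cons]
        rw [ihs, ihs (if (PySem.Dict.mk w).contains k then 0 + (PySem.Dict.mk w).getD k 0 else 0)]
        by_cases hw : (PySem.Dict.mk w).contains k
        · simp only [hw, if_true]
          omega
        · simp [hw]
    simp only [List.foldl_cons, List.flatten_cons, List.filter_append, List.map_append,
      List.sum_append]
    rw [hshift, ih ht, ← pvDictContrib v hv k]
    by_cases hw : (PySem.Dict.mk v).contains k <;> simp [hw]

-- B's final scan is A's best-fold with the pair components swapped
theorem pvSwapFold (L : List (List Int × Int)) :
    ∀ (mt : Int) (ms : Option (List Int)),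
    L.foldl (fun st p => if p.2 > st.2 then (some p.1, p.2) else st) (ms, mt)
      = ((L.foldl pvBestStep (mt, ms)).2, (L.foldl pvBestStep (mt, ms)).1) := by
  induction L with
  | nil => intro mt ms; rfl
  | cons p t ih =>
    intro mt ms
    simp only [List.foldl_cons, pvBestStep]
    by_cases h : p.2 > mt <;> simp [h, ih]

-- ===== VERDICT (by name: the statement is the Claim_ definition above) =====
theorem find_best_sequence_spec : Claim_equal_find_best_sequence := by
  intro sequences _hdom hpre
  unfold Spec_find_best_sequence find_best_sequence find_best_sequence_alt
  have hitems : ∀ v : List (List Int × Int), (PySem.Dict.mk v).items = v := fun _ => rfl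
  -- flatten both nested folds
  rw [show (fun (st : Int × Option (List Int) × PySem.Set (List Int)) values =>
        List.foldl (fun st (p : List Int × Int) =>
          if PySem.Set.contains st.2.2 p.1 then st
          else
            let value := pv_total_value p.1 sequences
            if value > st.1 then (value, some p.1, PySem.Set.add st.2.2 p.1)
            else (st.1, st.2.1, PySem.Set.add st.2.2 p.1)) st (PySem.Dict.mk values).items)
      = (fun st values => List.foldl (fun st (p : List Int × Int) =>
          if PySem.Set.contains st.2.2 p.1 then st
          else
            let value := pv_total_value p.1 sequences
            if value > st.1 then (value, some p.1, PySem.Set.add st.2.2 p.1)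
            else (st.1, st.2.1, PySem.Set.add st.2.2 p.1)) st values) from rfl]
  rw [show (fun (d : PySem.Dict (List Int) Int) values =>
        List.foldl (fun d (p : List Int × Int) => d.insert p.1 (d.getD p.1 0 + p.2)) d
          (PySem.Dict.mk values).items)
      = (fun d values => List.foldl (fun d (p : List Int × Int) =>
          d.insert p.1 (d.getD p.1 0 + p.2)) d values) from rfl]
  rw [← List.foldl_flatten, ← List.foldl_flatten]
  set flat := sequences.flatten with hflat
  -- characterise B's totals dict
  set totals := flat.foldl (fun d (p : List Int × Int) => d.insert p.1 (d.getD p.1 0 + p.2))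
    PySem.Dict.empty with htotals
  have hkeys : totals.keys = PySem.Set.ofList (flat.map Prod.fst) := by
    rw [htotals, PySem.Dict.keys_foldl_insert_key flat Prod.fst
      (fun d p => d.getD p.1 0 + p.2) PySem.Dict.empty]
    rw [PySem.Dict.keys_empty]
    exact PySem.Set.update_empty _
  have hnodup : totals.keys.Nodup := by
    rw [hkeys]; exact PySem.Set.nodup_ofList _
  have hget : ∀ k, totals.getD k 0 = ((flat.filter (fun p => p.1 == k)).map Prod.snd).sum := by
    intro k
    rw [htotals, pvGetDFold flat PySem.Dict.empty k, PySem.Dict.getD_empty]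
    omega
  have hitemsEq : totals.items
      = (PySem.Set.ofList (flat.map Prod.fst)).map (fun k => (k, pv_total_value k sequences)) := by
    rw [PySem.Dict.items_eq_map_keys totals hnodup 0, hkeys]
    refine List.map_congr_left ?_
    intro k _
    rw [hget k, pvTotalEq sequences hpre k]
  -- characterise A's fold
  rw [pvAFold sequences flat 0 none PySem.Set.empty]
  have hnews : pvNews PySem.Set.empty (flat.map Prod.fst)
      = PySem.Set.ofList (flat.map Prod.fst) := by
    rw [pvNews_eq, PySem.Set.update_empty]
    simp
  simp only [hitemsEq, hnews, pvSwapFold]
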